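-- pv_equiv track=rewrite | github.com/svucyno/hack126 | Backend/apps/engine/step5_balancer.py | _formality_gap_ok
-- ===== SOURCE A (Python) =====
-- def _formality_gap_ok(combo: dict) -> tuple[bool, int]:
--     """
--     Check that no two items are more than 1 formality level apart.
--     Returns (passes: bool, max_gap: int)
--     """
--     formalities = []
--     for slot in ["top", "bottom", "shoes", "accessory"]:
--         item = combo.get(slot, {})
--         formalities.append(item.get("formality", 3))
--
--     max_gap = 0
--     for i in range(len(formalities)):
--         for j in range(i + 1, len(formalities)):
--             gap = abs(formalities[i] - formalities[j])
--             max_gap = max(max_gap, gap)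
--
--     return max_gap <= 1, max_gap
-- ===== SOURCE B (Python) =====
-- def _formality_gap_ok(combo: dict) -> tuple[bool, int]:
--     formalities = [combo.get(slot, {}).get("formality", 3)
--                    for slot in ["top", "bottom", "shoes", "accessory"]]
--     max_gap = max(formalities) - min(formalities)
--     return max_gap <= 1, max_gap
-- ===== Notes on version B (the rewrite author's own statement) =====
-- stated objective: simpler
-- what changed: Replaces the O(n^2) nested pairwise-gap double loop with a single max(...) - min(...) reduction, using the identity that the largest pairwise absolute difference equals max minus min.
import Mathlib
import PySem

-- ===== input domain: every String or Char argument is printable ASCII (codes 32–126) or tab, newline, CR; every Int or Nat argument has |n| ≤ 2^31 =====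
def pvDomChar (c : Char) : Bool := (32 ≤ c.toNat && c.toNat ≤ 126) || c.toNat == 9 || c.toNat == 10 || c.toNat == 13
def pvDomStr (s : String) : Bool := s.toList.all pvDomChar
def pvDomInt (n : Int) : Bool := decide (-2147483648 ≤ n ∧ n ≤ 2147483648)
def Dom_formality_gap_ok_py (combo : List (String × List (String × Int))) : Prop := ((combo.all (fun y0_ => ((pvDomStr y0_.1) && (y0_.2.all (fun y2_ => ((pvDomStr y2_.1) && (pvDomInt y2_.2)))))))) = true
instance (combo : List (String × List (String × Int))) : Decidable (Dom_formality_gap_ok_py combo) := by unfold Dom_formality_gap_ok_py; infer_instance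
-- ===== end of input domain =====

-- B replaces A's nested pairwise-gap double loop by a single max(...) - min(...) reduction (simpler).

-- ===== PORT A =====
-- combo.get(slot, {}).get("formality", 3): first-match dict lookup with defaults
def fgoFor (combo : List (String × List (String × Int))) (slot : String) : Int :=
  PySem.Dict.getD (PySem.Dict.mk (PySem.Dict.getD (PySem.Dict.mk combo) slot [])) "formality" 3

def formality_gap_ok_py (combo : List (String × List (String × Int))) : Bool × Int :=
  let formalities : List Int :=
    ["top", "bottom", "shoes", "accessory"].foldl
      (fun acc slot => acc ++ [fgoFor combo slot]) []
  let max_gap : Int :=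
    (PySem.List.pyRange 0 (formalities.length : Int) 1).foldl
      (fun m i =>
        (PySem.List.pyRange (i + 1) (formalities.length : Int) 1).foldl
          (fun m j =>
            let gap := |PySem.List.pyGetD formalities i 0 - PySem.List.pyGetD formalities j 0|
            max m gap) m) 0
  (decide (max_gap ≤ 1), max_gap)

-- ===== PORT B =====
def formality_gap_ok_py_alt (combo : List (String × List (String × Int))) : Bool × Int :=
  let formalities : List Int :=
    ["top", "bottom", "shoes", "accessory"].map (fun slot => fgoFor combo slot)
  -- max(formalities) / min(formalities): the list always has four elements, so the .getD 0 never fires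
  let max_gap : Int :=
    (PySem.List.max? formalities (fun x => x)).getD 0
      - (PySem.List.min? formalities (fun x => x)).getD 0
  (decide (max_gap ≤ 1), max_gap)

-- ===== PRECONDITION & SPEC =====
def Spec_formality_gap_ok_py (combo : List (String × List (String × Int))) (out : Bool × Int) : Prop := out = formality_gap_ok_py_alt combo
instance (combo : List (String × List (String × Int))) (out : Bool × Int) : Decidable (Spec_formality_gap_ok_py combo out) := by unfold Spec_formality_gap_ok_py; infer_instance

-- ===== CLAIM (what is proved, stated in full; the proofs are below) =====
def Claim_equal_formality_gap_ok_py : Prop := ∀ (combo : List (String × List (String × Int))), Dom_formality_gap_ok_py combo → Spec_formality_gap_ok_py combo (formality_gap_ok_py combo)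

-- ===== LEMMAS AND PROOFS =====
-- The largest pairwise absolute gap among four integers equals max minus min.
set_option maxHeartbeats 1000000 in
theorem fgo_key (a b c d : Int) :
    max (max (max (max (max (max 0 |a - b|) |a - c|) |a - d|) |b - c|) |b - d|) |c - d|
      = max (max (max a b) c) d - min (min (min a b) c) d := by
  apply le_antisymm
  · refine max_le (max_le (max_le (max_le (max_le (max_le ?_ ?_) ?_) ?_) ?_) ?_) ?_
    · omega
    all_goals rw [abs_sub_le_iff]; constructor <;> omega
  · have h1 := abs_sub_le_iff.mp (le_refl |a - b|)
    have h2 := abs_sub_le_iff.mp (le_refl |a - c|)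
    have h3 := abs_sub_le_iff.mp (le_refl |a - d|)
    have h4 := abs_sub_le_iff.mp (le_refl |b - c|)
    have h5 := abs_sub_le_iff.mp (le_refl |b - d|)
    have h6 := abs_sub_le_iff.mp (le_refl |c - d|)
    have c1 : |a - b| ≤ max 0 |a - b| := le_max_right _ _
    have c2 : max 0 |a-b| ≤ max (max 0 |a-b|) |a-c| := le_max_left _ _
    have c3 : max (max 0 |a-b|) |a-c| ≤ max (max (max 0 |a-b|) |a-c|) |a-d| := le_max_left _ _
    have c4 : max (max (max 0 |a-b|) |a-c|) |a-d| ≤ max (max (max (max 0 |a-b|) |a-c|) |a-d|) |b-c| := le_max_left _ _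
    have c5 : max (max (max (max 0 |a-b|) |a-c|) |a-d|) |b-c| ≤ max (max (max (max (max 0 |a-b|) |a-c|) |a-d|) |b-c|) |b-d| := le_max_left _ _
    have c6 : max (max (max (max (max 0 |a-b|) |a-c|) |a-d|) |b-c|) |b-d| ≤ max (max (max (max (max (max 0 |a-b|) |a-c|) |a-d|) |b-c|) |b-d|) |c-d| := le_max_left _ _
    have d2 : |a-c| ≤ max (max 0 |a-b|) |a-c| := le_max_right _ _
    have d3 : |a-d| ≤ max (max (max 0 |a-b|) |a-c|) |a-d| := le_max_right _ _
    have d4 : |b-c| ≤ max (max (max 0 |a-b|) |a-c|) |a-d| ⊔ |b-c| := le_max_right _ _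
    have d5 : |b-d| ≤ max (max (max (max 0 |a-b|) |a-c|) |a-d|) |b-c| ⊔ |b-d| := le_max_right _ _
    have d6 : |c-d| ≤ max (max (max (max (max 0 |a-b|) |a-c|) |a-d|) |b-c|) |b-d| ⊔ |c-d| := le_max_right _ _
    omega

-- ===== VERDICT (by name: the statement is the Claim_ definition above) =====
set_option maxHeartbeats 1000000 in
theorem formality_gap_ok_py_spec : Claim_equal_formality_gap_ok_py := by
  intro combo _
  unfold Spec_formality_gap_ok_py formality_gap_ok_py formality_gap_ok_py_alt
  simp only [List.foldl, List.map, List.nil_append, List.cons_append,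
    List.length_cons, List.length_nil,
    PySem.List.max?_id_cons, PySem.List.min?_id_cons, Option.getD_some]
  have h4 : ((0 + 1 + 1 + 1 + 1 : Nat) : Int) = 4 := by norm_num
  simp only [h4, show PySem.List.pyRange 0 4 1 = [0, 1, 2, 3] from by decide]
  simp only [List.foldl]
  simp only [show PySem.List.pyRange (0+1) 4 1 = [1, 2, 3] from by decide,
    show PySem.List.pyRange (1+1) 4 1 = [2, 3] from by decide,
    show PySem.List.pyRange (2+1) 4 1 = [3] from by decide,
    show PySem.List.pyRange (3+1) 4 1 = ([] : List Int) from by decide]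
  simp only [List.foldl]
  simp only [PySem.List.pyGetD_ofNat', List.getD, List.getElem?_cons_zero,
    List.getElem?_cons_succ, Option.getD_some]
  rw [fgo_key]
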